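-- pv_equiv track=rewrite | github.com/yixuan-wei/SomeProblems | 010.py | count
-- ===== SOURCE A (Python) =====
-- def count(maxi,each,temp,W):
--     copy = each.copy()
--     if temp>=W:
--         return maxi+1
--     if len(copy)==0:
--         maxi+=1
--     elif len(copy)>0:
--         if temp+copy[0]>W:
--             return maxi+1
--         else:
--             t = copy[0]
--             copy.pop(0)
--             maxi = count(maxi,copy,temp+t,W)
--             maxi = count(maxi,copy,temp,W)
--     return maxi
-- ===== SOURCE B (Python) =====
-- def count(maxi, each, temp, W):
--     # Iterative two-pass tabulation on (position, running sum) states instead of A's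
--     # include/skip recursion: a forward pass collects the reachable sums per position,
--     # a backward pass tabulates the leaf count for each reachable state exactly once.
--     n = len(each)
--     reaches = [{temp}]
--     r = {temp}
--     for x in each:
--         nxt = set()
--         for t in r:
--             if t < W and t + x <= W:
--                 nxt.add(t + x)
--                 nxt.add(t)
--         r = nxt
--         reaches.append(r)
--     table = {t: 1 for t in reaches[n]}
--     for x, r in zip(reversed(each), reversed(reaches[:-1])):
--         cur = {}
--         for t in r:
--             if t >= W or t + x > W:
--                 cur[t] = 1
--             else:
--                 cur[t] = table[t + x] + table[t]
--         table = cur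
--     return maxi + table[temp]
-- ===== Notes on version B (the rewrite author's own statement) =====
-- stated objective: alternative
-- what changed: Replaced A's include/skip recursion that threads an accumulator with an iterative two-pass tabulation on (position, running sum) states: a forward pass collecting reachable sums per position and a backward pass tabulating each state's leaf count once, adding maxi at the end.
import Mathlib
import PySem

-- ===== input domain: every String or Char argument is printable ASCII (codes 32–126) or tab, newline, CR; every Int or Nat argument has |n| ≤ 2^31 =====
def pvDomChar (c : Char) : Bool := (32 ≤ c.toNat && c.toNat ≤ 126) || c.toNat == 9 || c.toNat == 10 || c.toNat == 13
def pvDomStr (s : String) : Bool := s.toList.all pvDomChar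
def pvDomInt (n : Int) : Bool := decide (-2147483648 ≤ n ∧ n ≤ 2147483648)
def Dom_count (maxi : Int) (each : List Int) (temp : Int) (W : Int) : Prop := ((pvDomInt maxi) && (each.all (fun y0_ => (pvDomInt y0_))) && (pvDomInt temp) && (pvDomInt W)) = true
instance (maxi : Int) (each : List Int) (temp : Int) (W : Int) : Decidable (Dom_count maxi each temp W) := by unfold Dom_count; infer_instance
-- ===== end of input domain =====

-- B replaces A's include/skip recursion with an iterative two-pass tabulation on
-- (position, running sum) states (objective: alternative algorithm, same worst-case cost).

-- ===== PORT A =====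
-- literal transliteration of A: recursion threading the accumulator `maxi`
def count (maxi : Int) (each : List Int) (temp : Int) (W : Int) : Int :=
  if temp ≥ W then maxi + 1
  else
    match each with
    | [] => maxi + 1
    | x :: rest =>
      if temp + x > W then maxi + 1
      else
        let m1 := count maxi rest (temp + x) W
        count m1 rest temp W
termination_by each.length
decreasing_by all_goals simp

-- ===== PORT B =====
-- inner loop of Source B's forward pass: nxt = set(); for t in r: if t < W and t + x <= W: nxt.add(t+x); nxt.add(t)
def stepReach (W x : Int) (r : List Int) : List Int :=
  r.foldl (fun nxt t =>
    if t < W ∧ t + x ≤ W then PySem.Set.add (PySem.Set.add nxt (t + x)) t else nxt)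
    PySem.Set.empty

-- inner loop of Source B's backward pass: cur = {}; for t in r: cur[t] = 1 or table[t+x]+table[t]
-- (table[…] is looked up with getD 0; the forward pass guarantees the key is present, so this is exact;
-- the dict built here does not depend on the set's iteration order: each key gets a fixed value)
def layerFold (W x : Int) (r : List Int) (tbl : PySem.Dict Int Int) : PySem.Dict Int Int :=
  r.foldl (fun cur t =>
    if t ≥ W ∨ t + x > W then cur.insert t 1
    else cur.insert t (tbl.getD (t + x) 0 + tbl.getD t 0))
    PySem.Dict.empty

-- transliteration of Source B: forward fold collecting (current reach set, list of reach sets),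
-- then the backward fold over zip(reversed(each), reversed(reaches[:-1])) ('[:-1]' = dropLast, exact)
def count_alt (maxi : Int) (each : List Int) (temp : Int) (W : Int) : Int :=
  let init : List Int := PySem.Set.ofList [temp]
  let fwd := each.foldl (fun (st : List Int × List (List Int)) x =>
      let nxt := stepReach W x st.1
      (nxt, st.2 ++ [nxt])) (init, [init])
  let table0 := fwd.1.foldl (fun d t => d.insert t (1 : Int)) PySem.Dict.empty
  let table := (each.reverse.zip fwd.2.dropLast.reverse).foldl
      (fun tbl p => layerFold W p.1 p.2 tbl) table0
  maxi + table.getD temp 0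

-- ===== PRECONDITION & SPEC =====
def Spec_count (maxi : Int) (each : List Int) (temp : Int) (W : Int) (out : Int) : Prop := out = count_alt maxi each temp W
instance (maxi : Int) (each : List Int) (temp : Int) (W : Int) (out : Int) : Decidable (Spec_count maxi each temp W out) := by unfold Spec_count; infer_instance

-- ===== CLAIM (what is proved, stated in full; the proofs are below) =====
def Claim_equal_count : Prop := ∀ (maxi : Int) (each : List Int) (temp : Int) (W : Int), Dom_count maxi each temp W → Spec_count maxi each temp W (count maxi each temp W)

-- ===== LEMMAS AND PROOFS =====

-- the pure leaf count both programs compute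
def fCount (W : Int) : List Int → Int → Int
  | each, temp =>
    if temp ≥ W then 1
    else
      match each with
      | [] => 1
      | x :: rest =>
        if temp + x > W then 1
        else fCount W rest (temp + x) + fCount W rest temp
termination_by each => each.length
decreasing_by all_goals simp

theorem count_eq_add_fCount (W : Int) (each : List Int) :
    ∀ (maxi temp : Int), count maxi each temp W = maxi + fCount W each temp := by
  induction each with
  | nil =>
    intro maxi temp
    rw [count, fCount]
    split_ifs <;> simp
  | cons x rest ih =>
    intro maxi temp
    rw [count, fCount]
    split_ifs with h1 h2
    · simp
    · simp
    · simp only [ih]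
      ring

-- recursive models of the two iterative passes
def reachesList (W : Int) : List Int → List Int → List (List Int)
  | [], r => [r]
  | x :: rest, r => r :: reachesList W rest (stepReach W x r)

def lastReach (W : Int) : List Int → List Int → List Int
  | [], r => r
  | x :: rest, r => lastReach W rest (stepReach W x r)

def model (W : Int) : List Int → List Int → PySem.Dict Int Int
  | [], r => r.foldl (fun d t => d.insert t (1 : Int)) PySem.Dict.empty
  | x :: rest, r => layerFold W x r (model W rest (stepReach W x r))

theorem head_reachesList (W : Int) (each r : List Int) :
    reachesList W each r = r :: (reachesList W each r).tail := by
  cases each <;> rfl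

theorem length_reachesList (W : Int) (each : List Int) :
    ∀ r, (reachesList W each r).length = each.length + 1 := by
  induction each with
  | nil => intro r; rfl
  | cons x rest ih => intro r; simp [reachesList, ih]

theorem fwd_spec (W : Int) (each : List Int) :
    ∀ (r : List Int) (acc : List (List Int)),
      each.foldl (fun (st : List Int × List (List Int)) x =>
        let nxt := stepReach W x st.1
        (nxt, st.2 ++ [nxt])) (r, acc)
      = (lastReach W each r, acc ++ (reachesList W each r).tail) := by
  induction each with
  | nil => intro r acc; simp [lastReach, reachesList]
  | cons x rest ih =>
    intro r acc
    simp only [List.foldl_cons]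
    rw [ih]
    rw [List.append_assoc]
    simp only [List.singleton_append]
    rw [show stepReach W x r :: (reachesList W rest (stepReach W x r)).tail
        = reachesList W rest (stepReach W x r) from
      (head_reachesList W rest (stepReach W x r)).symm]
    rfl

theorem back_spec (W : Int) (each : List Int) :
    ∀ (r : List Int),
      ((each.reverse.zip (reachesList W each r).dropLast.reverse).foldl
        (fun tbl p => layerFold W p.1 p.2 tbl)
        ((lastReach W each r).foldl (fun d t => d.insert t (1 : Int)) PySem.Dict.empty))
      = model W each r := by
  induction each with
  | nil => intro r; simp [reachesList, lastReach, model]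
  | cons x rest ih =>
    intro r
    have hne : reachesList W rest (stepReach W x r) ≠ [] := by
      rw [head_reachesList]; simp
    have hdrop : (reachesList W (x :: rest) r).dropLast
        = r :: (reachesList W rest (stepReach W x r)).dropLast := by
      show (r :: reachesList W rest (stepReach W x r)).dropLast = _
      exact List.dropLast_cons_of_ne_nil hne
    have hlen : rest.reverse.length
        = (reachesList W rest (stepReach W x r)).dropLast.reverse.length := by
      simp [length_reachesList]
    rw [hdrop]
    simp only [List.reverse_cons]
    rw [List.zip_append hlen, List.foldl_append]
    have hlast : lastReach W (x :: rest) r = lastReach W rest (stepReach W x r) := rfl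
    rw [hlast, ih]
    rfl

theorem getD_foldl_insertg_of_not_mem {l : List Int} {t : Int} (g : Int → Int) :
    t ∉ l → ∀ (d : PySem.Dict Int Int),
      (l.foldl (fun d u => d.insert u (g u)) d).getD t 0 = d.getD t 0 := by
  induction l with
  | nil => intro _ d; rfl
  | cons u rest ih =>
    intro h d
    simp only [List.mem_cons, not_or] at h
    simp only [List.foldl_cons]
    rw [ih h.2, PySem.Dict.getD_insert, if_neg h.1]

theorem getD_foldl_insertg_of_mem {l : List Int} {t : Int} (g : Int → Int) :
    t ∈ l → ∀ (d : PySem.Dict Int Int),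
      (l.foldl (fun d u => d.insert u (g u)) d).getD t 0 = g t := by
  induction l with
  | nil => intro h; cases h
  | cons u rest ih =>
    intro h d
    simp only [List.foldl_cons]
    by_cases hm : t ∈ rest
    · exact ih hm _
    · have ht : t = u := by
        rcases List.mem_cons.mp h with h1 | h1
        · exact h1
        · exact absurd h1 hm
      rw [getD_foldl_insertg_of_not_mem g hm, ht, PySem.Dict.getD_insert_self]

theorem mem_foldl_step_mono (W x : Int) (y : Int) (r : List Int) :
    ∀ (acc : List Int), y ∈ acc →
      y ∈ r.foldl (fun nxt t =>
        if t < W ∧ t + x ≤ W then PySem.Set.add (PySem.Set.add nxt (t + x)) t else nxt) acc := by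
  induction r with
  | nil => intro acc h; exact h
  | cons u rest ih =>
    intro acc h
    simp only [List.foldl_cons]
    apply ih
    split_ifs with hc
    · simp [PySem.Set.mem_add, h]
    · exact h

theorem mem_stepReach {W x t : Int} {r : List Int}
    (ht : t ∈ r) (h1 : t < W) (h2 : t + x ≤ W) :
    t + x ∈ stepReach W x r ∧ t ∈ stepReach W x r := by
  unfold stepReach
  have main : ∀ (l : List Int) (acc : List Int), t ∈ l →
      t + x ∈ l.foldl (fun nxt u =>
        if u < W ∧ u + x ≤ W then PySem.Set.add (PySem.Set.add nxt (u + x)) u else nxt) acc ∧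
      t ∈ l.foldl (fun nxt u =>
        if u < W ∧ u + x ≤ W then PySem.Set.add (PySem.Set.add nxt (u + x)) u else nxt) acc := by
    intro l
    induction l with
    | nil => intro acc h; cases h
    | cons u rest ih =>
      intro acc h
      by_cases hm : t ∈ rest
      · exact ih _ hm
      · have ht' : t = u := by
          rcases List.mem_cons.mp h with h' | h'
          · exact h'
          · exact absurd h' hm
        subst ht'
        simp only [List.foldl_cons, if_pos (And.intro h1 h2)]
        constructor
        · exact mem_foldl_step_mono W x (t + x) rest _ (by simp [PySem.Set.mem_add])
        · exact mem_foldl_step_mono W x t rest _ (by simp [PySem.Set.mem_add])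
  exact main r PySem.Set.empty ht

theorem model_correct (W : Int) (each : List Int) :
    ∀ (r : List Int) (t : Int), t ∈ r →
      (model W each r).getD t 0 = fCount W each t := by
  induction each with
  | nil =>
    intro r t ht
    show (r.foldl (fun d u => d.insert u ((fun _ => (1 : Int)) u)) PySem.Dict.empty).getD t 0 = _
    rw [getD_foldl_insertg_of_mem _ ht, fCount]
    split_ifs <;> rfl
  | cons x rest ih =>
    intro r t ht
    show (layerFold W x r (model W rest (stepReach W x r))).getD t 0 = _
    unfold layerFold
    have hfun : (fun (cur : PySem.Dict Int Int) (u : Int) =>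
        if u ≥ W ∨ u + x > W then cur.insert u 1
        else cur.insert u ((model W rest (stepReach W x r)).getD (u + x) 0
          + (model W rest (stepReach W x r)).getD u 0))
        = (fun (cur : PySem.Dict Int Int) (u : Int) =>
          cur.insert u (if u ≥ W ∨ u + x > W then 1
            else (model W rest (stepReach W x r)).getD (u + x) 0
              + (model W rest (stepReach W x r)).getD u 0)) := by
      funext cur u; split_ifs <;> rfl
    rw [hfun, getD_foldl_insertg_of_mem _ ht, fCount]
    by_cases h1 : t ≥ W
    · simp [h1]
    · by_cases h2 : t + x > W
      · simp [h1, h2]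
      · have hmem := mem_stepReach (W := W) (x := x) ht (by omega) (by omega)
        rw [if_neg h1, if_neg (by omega : ¬(t ≥ W ∨ t + x > W))]
        rw [ih _ _ hmem.1, ih _ _ hmem.2, if_neg h2]

-- ===== VERDICT (by name: the statement is the Claim_ definition above) =====
theorem count_spec : Claim_equal_count := by
  intro maxi each temp W _
  unfold Spec_count count_alt
  rw [count_eq_add_fCount]
  simp only []
  rw [fwd_spec W each (PySem.Set.ofList [temp]) [PySem.Set.ofList [temp]]]
  have hreach : [PySem.Set.ofList [temp]]
      ++ (reachesList W each (PySem.Set.ofList [temp])).tail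
      = reachesList W each (PySem.Set.ofList [temp]) := by
    rw [head_reachesList W each (PySem.Set.ofList [temp])]
    rfl
  rw [hreach]
  rw [back_spec W each (PySem.Set.ofList [temp])]
  have htemp : temp ∈ (PySem.Set.ofList [temp] : List Int) := by
    simp [PySem.Set.ofList, PySem.Set.add, PySem.Set.empty]
  rw [model_correct W each (PySem.Set.ofList [temp]) temp htemp]
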